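-- pv_equiv track=rewrite | github.com/pypi-data/pypi-mirror-378 | packages/kdotpy/kdotpy-1.3.0.tar.gz/kdotpy-1.3.0/src/kdotpy/symbolic.py | _count_pm
-- ===== SOURCE A (Python) =====
-- def _count_pm(op):
-- 	"""Count number of + and number of - in operator."""
-- 	pm = [0, 0]
-- 	for o in op:
-- 		if o == '+':
-- 			pm[0] += 1
-- 		elif o == '-':
-- 			pm[1] += 1
-- 		else:
-- 			raise ValueError("ERROR (_count_pm): Illegal operator. Only + and - are allowed.")
-- 	return tuple(pm)
-- ===== SOURCE B (Python) =====
-- def _count_pm(op):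
-- 	"""Count number of + and number of - in operator."""
-- 	plus = op.count('+')
-- 	minus = op.count('-')
-- 	if plus + minus != len(op):
-- 		raise ValueError("ERROR (_count_pm): Illegal operator. Only + and - are allowed.")
-- 	return (plus, minus)
-- ===== Notes on version B (the rewrite author's own statement) =====
-- stated objective: simpler
-- what changed: Replaces the per-character branching loop (which raises on the first illegal character) with two str.count passes plus a single aggregate length check for validity; return value and exception type are identical.
import Mathlib
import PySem

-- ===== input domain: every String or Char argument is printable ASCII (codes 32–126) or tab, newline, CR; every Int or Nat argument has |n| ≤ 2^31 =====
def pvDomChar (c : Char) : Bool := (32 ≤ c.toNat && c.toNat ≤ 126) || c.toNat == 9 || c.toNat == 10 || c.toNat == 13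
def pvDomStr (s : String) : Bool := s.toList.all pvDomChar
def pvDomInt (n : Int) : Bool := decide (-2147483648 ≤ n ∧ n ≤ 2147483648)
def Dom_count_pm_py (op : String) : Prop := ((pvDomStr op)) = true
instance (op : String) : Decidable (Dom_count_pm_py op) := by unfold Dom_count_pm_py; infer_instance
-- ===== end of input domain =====

-- B replaces A's per-character branching loop by two str.count passes plus one
-- aggregate length check for validity (simpler; same return value and exception type,
-- only the point at which the error is raised shifts, which is unobservable).


-- ===== PORT A =====
-- A's loop: pm = [0, 0]; for o in op: '+' → pm[0] += 1, '-' → pm[1] += 1, otherwise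
-- raise ValueError. The raise case is excluded by Pre_count_pm_py; on the else branch
-- the fold leaves the state unchanged (that branch is never reached inside Pre_).
def count_pm_py (op : String) : Int × Int :=
  op.toList.foldl
    (fun pm o =>
      if o = '+' then (pm.1 + 1, pm.2)
      else if o = '-' then (pm.1, pm.2 + 1)
      else pm)  -- Python raises ValueError here; excluded by Pre_count_pm_py
    (0, 0)

-- ===== PORT B =====
-- B: plus = op.count('+'); minus = op.count('-'); if plus + minus != len(op): raise
-- ValueError (excluded by Pre_count_pm_py); return (plus, minus).
def count_pm_py_alt (op : String) : Int × Int :=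
  let plus : Int := PySem.Str.count op "+"
  let minus : Int := PySem.Str.count op "-"
  -- if plus + minus ≠ len(op) then Python raises ValueError; excluded by Pre_count_pm_py
  (plus, minus)

-- ===== PRECONDITION & SPEC =====
-- Pre_: every character of op is '+' or '-' — exactly the inputs on which A (and B)
-- return instead of raising ValueError.
def Pre_count_pm_py (op : String) : Prop :=
  op.toList.all (fun c => c == '+' || c == '-') = true
instance (op : String) : Decidable (Pre_count_pm_py op) := by unfold Pre_count_pm_py; infer_instance
def pvWitness_count_pm_py : String := "+-+"

def Spec_count_pm_py (op : String) (out : Int × Int) : Prop := out = count_pm_py_alt op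
instance (op : String) (out : Int × Int) : Decidable (Spec_count_pm_py op out) := by unfold Spec_count_pm_py; infer_instance

-- ===== CLAIM (what is proved, stated in full; the proofs are below) =====
def Claim_equal_count_pm_py : Prop := ∀ (op : String), Dom_count_pm_py op → Pre_count_pm_py op → Spec_count_pm_py op (count_pm_py op)

-- ===== LEMMAS AND PROOFS =====

-- PySem.Chars.count for a single-character needle is List.count.
theorem chars_count_go_singleton (c : Char) (l : List Char) (fuel : Nat) (acc : Nat)
    (h : l.length ≤ fuel) :
    PySem.Chars.count.go [c] fuel l acc = acc + l.count c := by
  induction l generalizing fuel acc with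
  | nil => rw [PySem.Chars.count.go.eq_def]; cases fuel <;> simp
  | cons x t ih =>
    cases fuel with
    | zero => simp at h
    | succ fuel =>
      rw [PySem.Chars.count.go.eq_def]
      simp only [List.isPrefixOf, List.length_cons] at *
      by_cases hx : c = x
      · subst hx
        simp [ih fuel acc.succ (by omega)]
        omega
      · have hbx : (c == x) = false := by simp [hx]
        have hxc : ¬ x = c := fun h' => hx h'.symm
        simp [hbx, ih fuel acc (by omega), hxc]

theorem chars_count_singleton (s : List Char) (c : Char) :
    PySem.Chars.count s [c] = s.count c := by
  unfold PySem.Chars.count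
  simp [chars_count_go_singleton c s s.length 0 (le_refl _)]

-- A's fold counts '+' into the first and '-' into the second component, provided
-- every character is '+' or '-'.
theorem foldA_char (l : List Char) (p m : Int)
    (h : ∀ c ∈ l, c = '+' ∨ c = '-') :
    l.foldl
      (fun pm o =>
        if o = '+' then (pm.1 + 1, pm.2)
        else if o = '-' then (pm.1, pm.2 + 1)
        else pm)
      (p, m) = (p + l.count '+', m + l.count '-') := by
  induction l generalizing p m with
  | nil => simp
  | cons x t ih =>
    have hx := h x (by simp)
    have ht : ∀ c ∈ t, c = '+' ∨ c = '-' := fun c hc => h c (by simp [hc])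
    rcases hx with hx | hx <;>
      simp [hx, ih _ _ ht] <;> omega

-- ===== VERDICT (by name: the statement is the Claim_ definition above) =====
theorem count_pm_py_spec : Claim_equal_count_pm_py := by
  intro op _ hpre
  unfold Spec_count_pm_py count_pm_py count_pm_py_alt
  have h : ∀ c ∈ op.toList, c = '+' ∨ c = '-' := by
    intro c hc
    unfold Pre_count_pm_py at hpre
    rw [List.all_eq_true] at hpre
    have := hpre c hc
    simp at this
    tauto
  rw [foldA_char op.toList 0 0 h]
  simp [PySem.Str.count, chars_count_singleton]
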